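-- pv_equiv track=rewrite | github.com/yusokk/algorithm | week1/9095-1, 2, 3 더하기.py | plus_to_3
-- ===== SOURCE A (Python) =====
-- def plus_to_3(n):
--     if n == 1:
--         return 1
--     elif n == 2:
--         return 2
--     elif n == 3:
--         return 4
--     else:
--         num = plus_to_3(n-1) + plus_to_3(n-2) + plus_to_3(n-3)
--     return num
-- ===== SOURCE B (Python) =====
-- def plus_to_3(n):
--     if n == 1:
--         return 1
--     if n == 2:
--         return 2
--     a, b, c = 1, 2, 4
--     for _ in range(n - 3):
--         a, b, c = b, c, a + b + c
--     return c
-- ===== Notes on version B (the rewrite author's own statement) =====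
-- stated objective: faster
-- what changed: Replaced the naive triple recursion with a bottom-up iterative DP keeping a sliding window of the last three values.
-- outside the precondition, e.g. on plus_to_3(0): A raises RecursionError, B returns 4
import Mathlib
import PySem

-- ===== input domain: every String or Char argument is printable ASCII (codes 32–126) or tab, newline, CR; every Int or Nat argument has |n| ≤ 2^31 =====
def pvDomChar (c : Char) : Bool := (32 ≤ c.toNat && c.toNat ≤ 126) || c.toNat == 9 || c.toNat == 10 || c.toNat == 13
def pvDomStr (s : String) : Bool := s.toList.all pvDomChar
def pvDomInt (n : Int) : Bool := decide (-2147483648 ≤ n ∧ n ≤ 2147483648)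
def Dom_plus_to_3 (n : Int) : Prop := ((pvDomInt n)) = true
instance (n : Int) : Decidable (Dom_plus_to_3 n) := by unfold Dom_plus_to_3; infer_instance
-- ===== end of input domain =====

-- B replaces A's naive triple recursion by a bottom-up sliding-window DP (intended as faster; O(n) loop vs A's exponential recursion, as measured where A still finishes).

-- ===== PORT A =====
-- A's recursion diverges for n ≤ 0 (excluded by Pre_); on Nat inputs ≥ 1 it is the
-- literal recursion with base cases 1 ↦ 1, 2 ↦ 2, 3 ↦ 4.
def plus_to_3_go : Nat → Int
  | 0 => 0            -- unreachable under Pre_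
  | 1 => 1
  | 2 => 2
  | 3 => 4
  | (k+4) => plus_to_3_go (k+3) + plus_to_3_go (k+2) + plus_to_3_go (k+1)

def plus_to_3 (n : Int) : Int :=
  if n ≤ 0 then 0 else plus_to_3_go n.toNat

-- ===== PORT B =====
-- the for-loop of Source B over range(n-3) with state (a,b,c)
def plus_to_3_altLoop : Nat → Int × Int × Int → Int × Int × Int
  | 0, s => s
  | (k+1), (a, b, c) => plus_to_3_altLoop k (b, c, a + b + c)

def plus_to_3_alt (n : Int) : Int :=
  if n = 1 then 1
  else if n = 2 then 2
  else (plus_to_3_altLoop (n - 3).toNat (1, 2, 4)).2.2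

-- ===== PRECONDITION & SPEC =====
-- Pre_ excludes n ≤ 0, where A recurses without bound and raises RecursionError (B returns 4 there).
def Pre_plus_to_3 (n : Int) : Prop := 1 ≤ n
instance (n : Int) : Decidable (Pre_plus_to_3 n) := by unfold Pre_plus_to_3; infer_instance
def pvWitness_plus_to_3 : Int := 5

def Spec_plus_to_3 (n : Int) (out : Int) : Prop := out = plus_to_3_alt n
instance (n : Int) (out : Int) : Decidable (Spec_plus_to_3 n out) := by unfold Spec_plus_to_3; infer_instance

-- ===== CLAIM (what is proved, stated in full; the proofs are below) =====
def Claim_equal_plus_to_3 : Prop := ∀ (n : Int), Dom_plus_to_3 n → Pre_plus_to_3 n → Spec_plus_to_3 n (plus_to_3 n)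

-- ===== LEMMAS AND PROOFS =====

-- the loop started at the window (go (m+1), go (m+2), go (m+3)) ends at go (m+3+k)
theorem altLoop_window (k : Nat) : ∀ (m : Nat),
    (plus_to_3_altLoop k (plus_to_3_go (m+1), plus_to_3_go (m+2), plus_to_3_go (m+3))).2.2
      = plus_to_3_go (m + 3 + k) := by
  induction k with
  | zero => intro m; simp [plus_to_3_altLoop]
  | succ k ih =>
      intro m
      have h4 : plus_to_3_go (m+1) + plus_to_3_go (m+2) + plus_to_3_go (m+3)
          = plus_to_3_go (m+4) := by
        simp [plus_to_3_go]
        ring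
      have := ih (m+1)
      simp only [plus_to_3_altLoop]
      rw [h4] at *
      calc (plus_to_3_altLoop k (plus_to_3_go (m+2), plus_to_3_go (m+3), plus_to_3_go (m+4))).2.2
          = (plus_to_3_altLoop k (plus_to_3_go (m+1+1), plus_to_3_go (m+1+2), plus_to_3_go (m+1+3))).2.2 := by
            norm_num
        _ = plus_to_3_go (m+1+3+k) := ih (m+1)
        _ = plus_to_3_go (m+3+(k+1)) := by ring_nf

theorem go_eq_loop (k : Nat) :
    plus_to_3_go (3 + k) = (plus_to_3_altLoop k (1, 2, 4)).2.2 := by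
  have h := altLoop_window k 0
  simpa [plus_to_3_go] using h.symm

-- ===== VERDICT (by name: the statement is the Claim_ definition above) =====
theorem plus_to_3_spec : Claim_equal_plus_to_3 := by
  intro n _ hpre
  unfold Spec_plus_to_3 plus_to_3 plus_to_3_alt
  unfold Pre_plus_to_3 at hpre
  rcases eq_or_lt_of_le hpre with h1 | h1
  · simp [← h1, plus_to_3_go]
  · rcases eq_or_lt_of_le (by omega : (2:Int) ≤ n) with h2 | h2
    · simp [← h2, plus_to_3_go]
    · have hn0 : ¬ n ≤ 0 := by omega
      have hn1 : n ≠ 1 := by omega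
      have hn2 : n ≠ 2 := by omega
      simp only [if_neg hn0, if_neg hn1, if_neg hn2]
      have hk : n.toNat = 3 + (n - 3).toNat := by omega
      rw [hk, go_eq_loop]
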